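-- pv_equiv track=rewrite | github.com/forSubmission238/popl | analyser.py | number_type
-- ===== SOURCE A (Python) =====
-- def number_type(origin_dict):
--     new_dic, type_count, rev_dic = {}, {}, {}
--     for p, t in origin_dict.items():
--         if t not in type_count:
--             type_count[t] = 1
--         else:
--             type_count[t] += 1
--         new_dic[p] = '%s_%d' % (t, type_count[t])
--         rev_dic['%s_%d' % (t, type_count[t])] = p
--     return new_dic, rev_dic
-- ===== SOURCE B (Python) =====
-- def number_type(origin_dict):
--     groups = {}
--     for p, t in origin_dict.items():
--         groups.setdefault(t, []).append(p)
--     lab = {}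
--     for t, ps in groups.items():
--         for i, p in enumerate(ps, 1):
--             lab[p] = '%s_%d' % (t, i)
--     new_dic = {p: lab[p] for p in origin_dict}
--     rev_dic = {lab[p]: p for p in origin_dict}
--     return new_dic, rev_dic
-- ===== Notes on version B (the rewrite author's own statement) =====
-- stated objective: alternative
-- what changed: Replaces A's single stateful pass with a running per-type counter by a staged algorithm: first an index grouping keys by type is built (setdefault/append), then each group is enumerated from 1 into a label table, and finally both dicts are assembled by comprehensions over the original key order.
import Mathlib
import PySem

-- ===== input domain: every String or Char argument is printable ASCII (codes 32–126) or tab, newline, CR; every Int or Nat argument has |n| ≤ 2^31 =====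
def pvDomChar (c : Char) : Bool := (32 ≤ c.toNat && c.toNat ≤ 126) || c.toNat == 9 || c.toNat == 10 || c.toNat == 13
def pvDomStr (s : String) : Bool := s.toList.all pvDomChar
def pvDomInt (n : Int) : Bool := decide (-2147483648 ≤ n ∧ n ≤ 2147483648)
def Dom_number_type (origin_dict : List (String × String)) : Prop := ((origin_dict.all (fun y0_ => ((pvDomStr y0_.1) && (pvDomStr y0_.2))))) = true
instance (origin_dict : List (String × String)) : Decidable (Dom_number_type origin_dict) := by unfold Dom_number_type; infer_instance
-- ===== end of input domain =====

-- B relabels in stages — distinct types, a filter pass per type building a label table, then two assembly comprehensions — instead of A's single running-counter pass; alternative decomposition, same results.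


-- ===== PORT A =====
-- 'for p, t in origin_dict.items(): ...' with three dicts of running state
def number_type (origin_dict : List (String × String)) : (List (String × String)) × (List (String × String)) :=
  let st := origin_dict.foldl
    (fun (st : PySem.Dict String String × PySem.Dict String Int × PySem.Dict String String) pt =>
      let tc := if st.2.1.contains pt.2 = false
        then st.2.1.insert pt.2 1
        else st.2.1.insert pt.2 (st.2.1.getD pt.2 0 + 1)
      let label := pt.2 ++ "_" ++ PySem.Int.toStr (tc.getD pt.2 0)
      (st.1.insert pt.1 label, tc, st.2.2.insert label pt.1))
    (PySem.Dict.empty, PySem.Dict.empty, PySem.Dict.empty)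
  (st.1.items, st.2.2.items)

-- ===== PORT B =====
-- staged: a grouping index type -> its keys (setdefault/append = Dict.modify with default []),
-- then each group enumerated from 1 into a label table, then both dicts assembled by
-- comprehensions over the original key order (lab[p] always present; getD "" is exact)
def number_type_alt (origin_dict : List (String × String)) : (List (String × String)) × (List (String × String)) :=
  let groups : PySem.Dict String (List String) :=
    origin_dict.foldl (fun g pt => g.modify pt.2 [] (fun ps => ps ++ [pt.1])) PySem.Dict.empty
  let lab : PySem.Dict String String :=
    groups.items.foldl
      (fun lab tps =>
        (PySem.List.enumerate tps.2 1).foldl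
          (fun lab ip => lab.insert ip.2 (tps.1 ++ "_" ++ PySem.Int.toStr ip.1)) lab)
      PySem.Dict.empty
  let new_dic := origin_dict.foldl (fun d pt => d.insert pt.1 (lab.getD pt.1 "")) PySem.Dict.empty
  let rev_dic := origin_dict.foldl (fun d pt => d.insert (lab.getD pt.1 "") pt.1) PySem.Dict.empty
  (new_dic.items, rev_dic.items)

-- ===== PRECONDITION & SPEC =====
-- The Python argument is a dict, whose keys are necessarily distinct; Pre_ excludes only the
-- association lists with duplicate keys, which do not represent any Python dict input.
def Pre_number_type (origin_dict : List (String × String)) : Prop :=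
  (origin_dict.map (fun pt => pt.1)).Nodup
instance (origin_dict : List (String × String)) : Decidable (Pre_number_type origin_dict) := by unfold Pre_number_type; infer_instance
def pvWitness_number_type : (List (String × String)) := [("a", "int"), ("b", "str"), ("c", "int")]

def Spec_number_type (origin_dict : List (String × String)) (out : (List (String × String)) × (List (String × String))) : Prop := out = number_type_alt origin_dict
instance (origin_dict : List (String × String)) (out : (List (String × String)) × (List (String × String))) : Decidable (Spec_number_type origin_dict out) := by unfold Spec_number_type; infer_instance

-- ===== CLAIM (what is proved, stated in full; the proofs are below) =====
def Claim_equal_number_type : Prop := ∀ (origin_dict : List (String × String)), Dom_number_type origin_dict → Pre_number_type origin_dict → Spec_number_type origin_dict (number_type origin_dict)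

-- ===== LEMMAS AND PROOFS =====

/-- The labelled pairs A produces, with `cnt` the running per-type counts. -/
def pvBuild (cnt : PySem.Dict String Int) : List (String × String) → List (String × String)
  | [] => []
  | pt :: rest =>
      (pt.1, pt.2 ++ "_" ++ PySem.Int.toStr (cnt.getD pt.2 0 + 1)) ::
        pvBuild (cnt.insert pt.2 (cnt.getD pt.2 0 + 1)) rest

lemma pv_loopA_eq (l : List (String × String))
    (nd rd : PySem.Dict String String) (tc : PySem.Dict String Int) :
    l.foldl
      (fun (st : PySem.Dict String String × PySem.Dict String Int × PySem.Dict String String) pt =>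
        let tc := if st.2.1.contains pt.2 = false
          then st.2.1.insert pt.2 1
          else st.2.1.insert pt.2 (st.2.1.getD pt.2 0 + 1)
        let label := pt.2 ++ "_" ++ PySem.Int.toStr (tc.getD pt.2 0)
        (st.1.insert pt.1 label, tc, st.2.2.insert label pt.1))
      (nd, tc, rd)
    = ((pvBuild tc l).foldl (fun d pl => d.insert pl.1 pl.2) nd,
       l.foldl (fun d pt => d.insert pt.2 (d.getD pt.2 0 + 1)) tc,
       (pvBuild tc l).foldl (fun d pl => d.insert pl.2 pl.1) rd) := by
  induction l generalizing nd tc rd with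
  | nil => rfl
  | cons pt rest ih =>
    have htc : (if tc.contains pt.2 = false
        then tc.insert pt.2 1
        else tc.insert pt.2 (tc.getD pt.2 0 + 1))
        = tc.insert pt.2 (tc.getD pt.2 0 + 1) := by
      by_cases h : tc.contains pt.2 = false
      · simp [PySem.Dict.getD_of_not_contains, h]
      · simp [h]
    simp only [List.foldl_cons, pvBuild, htc, PySem.Dict.getD_insert_self]
    exact ih _ _ _

lemma pvBuild_length (cnt : PySem.Dict String Int) (l : List (String × String)) :
    (pvBuild cnt l).length = l.length := by
  induction l generalizing cnt with
  | nil => rfl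
  | cons pt rest ih => simp [pvBuild, ih]

/-- Closed form of A's labels: position `i` gets its type's count over the preceding prefix. -/
lemma pvBuild_getElem (l : List (String × String)) (cnt : PySem.Dict String Int)
    (i : Nat) (hi : i < l.length) (hb : i < (pvBuild cnt l).length) :
    (pvBuild cnt l)[i] =
      (l[i].1, l[i].2 ++ "_" ++
        PySem.Int.toStr (cnt.getD l[i].2 0 + (((l.take i).map (fun pt => pt.2)).count l[i].2 : Int) + 1)) := by
  induction l generalizing cnt i with
  | nil => simp at hi
  | cons pt rest ih =>
    cases i with
    | zero => simp [pvBuild]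
    | succ j =>
      have hj : j < rest.length := by simpa using hi
      have hb' : j < (pvBuild (cnt.insert pt.2 (cnt.getD pt.2 0 + 1)) rest).length := by
        simpa [pvBuild_length] using hj
      simp only [pvBuild, List.getElem_cons_succ]
      rw [ih _ j hj hb']
      have hcnt : (cnt.insert pt.2 (cnt.getD pt.2 0 + 1)).getD rest[j].2 0
          = cnt.getD rest[j].2 0 + (if rest[j].2 = pt.2 then 1 else 0) := by
        rw [PySem.Dict.getD_insert]
        by_cases h : rest[j].2 = pt.2 <;> simp [h]
      have hcount : (((pt :: rest).take (j + 1)).map (fun pt => pt.2)).count rest[j].2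
          = ((rest.take j).map (fun pt => pt.2)).count rest[j].2 + (if rest[j].2 = pt.2 then 1 else 0) := by
        simp only [List.take_succ_cons, List.map_cons, List.count_cons]
        by_cases h : rest[j].2 = pt.2
        · simp [h]
        · simp [h]
          simp [Ne.symm h]
      rw [hcnt, hcount]
      have harith : cnt.getD rest[j].2 0 + (if rest[j].2 = pt.2 then 1 else 0)
            + (((rest.take j).map (fun pt => pt.2)).count rest[j].2 : Int) + 1
          = cnt.getD rest[j].2 0
            + ((((rest.take j).map (fun pt => pt.2)).count rest[j].2 + (if rest[j].2 = pt.2 then 1 else 0) : Nat) : Int) + 1 := by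
        by_cases h : rest[j].2 = pt.2
        · simp [h]
          ring
        · simp [h]
      rw [harith]

/-- Folding inserts of pairs whose keys avoid `k` leaves the lookup of `k` unchanged. -/
lemma pv_getD_foldl_insert_not_mem (L : List (String × String)) (d : PySem.Dict String String)
    (k : String) (hk : k ∉ L.map (fun pl => pl.1)) :
    (L.foldl (fun d pl => d.insert pl.1 pl.2) d).getD k "" = d.getD k "" := by
  induction L generalizing d with
  | nil => rfl
  | cons pl rest ih =>
    simp only [List.map_cons, List.mem_cons, not_or] at hk
    simp only [List.foldl_cons]
    rw [ih _ hk.2, PySem.Dict.getD_insert]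
    simp [hk.1]

/-- With nodup keys, folding inserts realises the association list as lookups. -/
lemma pv_getD_foldl_insert_of_mem (L : List (String × String)) (d : PySem.Dict String String)
    (k v : String) (hnd : (L.map (fun pl => pl.1)).Nodup) (hm : (k, v) ∈ L) :
    (L.foldl (fun d pl => d.insert pl.1 pl.2) d).getD k "" = v := by
  induction L generalizing d with
  | nil => simp at hm
  | cons pl rest ih =>
    simp only [List.map_cons, List.nodup_cons] at hnd
    rcases List.mem_cons.mp hm with h | h
    · subst h
      simp only [List.foldl_cons]
      rw [pv_getD_foldl_insert_not_mem _ _ _ hnd.1]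
      simp [PySem.Dict.getD_insert_self]
    · simp only [List.foldl_cons]
      exact ih _ hnd.2 h

/-- The flat list of (key, label) insertions B's staged loops perform. -/
def pvFlat (l : List (String × String)) : List (String × String) :=
  (PySem.List.dedup (l.map (fun pt => pt.2))).flatMap (fun t =>
    (PySem.List.enumerate ((l.filter (fun pt => pt.2 == t)).map (fun pt => pt.1)) 1).map
      (fun ip => (ip.2, t ++ "_" ++ PySem.Int.toStr ip.1)))

/-- The grouping index realised as an association list: distinct types in first-occurrence
order, each with its keys in encounter order. -/
lemma pv_groups_items (l : List (String × String)) :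
    (l.foldl (fun g pt => g.modify pt.2 [] (fun ps => ps ++ [pt.1]))
        (PySem.Dict.empty : PySem.Dict String (List String))).items
    = (PySem.List.dedup (l.map (fun pt => pt.2))).map
        (fun t => (t, (l.filter (fun pt => pt.2 == t)).map (fun pt => pt.1))) := by
  set g := l.foldl (fun g pt => g.modify pt.2 [] (fun ps => ps ++ [pt.1]))
      (PySem.Dict.empty : PySem.Dict String (List String)) with hg
  have hswap : g = (l.map (fun pt => (pt.2, pt.1))).foldl
      (fun g p => g.modify p.1 [] (fun ps => ps ++ [p.2])) PySem.Dict.empty := by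
    rw [hg, List.foldl_map]
  have hkeys : g.keys = PySem.List.dedup (l.map (fun pt => pt.2)) := by
    have h := PySem.Dict.keys_foldl_modify_key l (fun pt => pt.2) []
      (fun _ pt ps => ps ++ [pt.1]) PySem.Dict.empty
    rw [hg]
    exact h.trans (by rw [PySem.List.dedup_eq_ofList]; rfl)
  have hnd : g.keys.Nodup := by
    rw [hkeys]
    exact PySem.List.nodup_dedup _
  rw [PySem.Dict.items_eq_map_keys g hnd [], hkeys]
  apply List.map_congr_left
  intro t ht
  have hget : g.getD t [] = (l.filter (fun pt => pt.2 == t)).map (fun pt => pt.1) := by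
    rw [hswap, PySem.Dict.getD_foldl_modify_append]
    rw [PySem.Dict.getD_empty, List.nil_append]
    rw [List.filter_map, List.map_map]
    rfl
  rw [hget]

lemma pv_lab_eq_foldl_flat (l : List (String × String)) :
    ((l.foldl (fun g pt => g.modify pt.2 [] (fun ps => ps ++ [pt.1]))
        (PySem.Dict.empty : PySem.Dict String (List String))).items).foldl
      (fun lab tps =>
        (PySem.List.enumerate tps.2 1).foldl
          (fun lab ip => lab.insert ip.2 (tps.1 ++ "_" ++ PySem.Int.toStr ip.1)) lab)
      PySem.Dict.empty
    = (pvFlat l).foldl (fun d pl => d.insert pl.1 pl.2) PySem.Dict.empty := by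
  rw [pv_groups_items, List.foldl_map]
  unfold pvFlat
  generalize PySem.List.dedup (l.map (fun pt => pt.2)) = ts
  generalize (PySem.Dict.empty : PySem.Dict String String) = d
  induction ts generalizing d with
  | nil => rfl
  | cons t rest ih =>
    simp only [List.foldl_cons, List.flatMap_cons, List.foldl_append, List.foldl_map]
    exact ih _

lemma pv_flat_keys (l : List (String × String)) :
    (pvFlat l).map (fun pl => pl.1)
    = (PySem.List.dedup (l.map (fun pt => pt.2))).flatMap (fun t =>
        (l.filter (fun pt => pt.2 == t)).map (fun pt => pt.1)) := by
  unfold pvFlat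
  rw [List.map_flatMap]
  congr 1; funext t
  rw [List.map_map]
  exact PySem.List.map_snd_enumerate _ _

lemma pv_key_inj (l : List (String × String)) (hnd : (l.map (fun pt => pt.1)).Nodup)
    {a b : String × String} (ha : a ∈ l) (hb : b ∈ l) (h : a.1 = b.1) : a = b :=
  List.inj_on_of_nodup_map hnd ha hb h

lemma pv_flat_keys_nodup (l : List (String × String)) (hnd : (l.map (fun pt => pt.1)).Nodup) :
    ((pvFlat l).map (fun pl => pl.1)).Nodup := by
  rw [pv_flat_keys]
  rw [List.nodup_flatMap]
  refine ⟨?_, ?_⟩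
  · intro t ht
    have hsub : ((l.filter (fun pt => pt.2 == t)).map (fun pt => pt.1)).Sublist
        (l.map (fun pt => pt.1)) := List.Sublist.map _ List.filter_sublist
    exact hnd.sublist hsub
  · refine (PySem.List.nodup_dedup _).imp ?_
    intro t t' hne x hx hx'
    simp only [List.mem_map, List.mem_filter] at hx hx'
    obtain ⟨a, ⟨hal, hat⟩, hax⟩ := hx
    obtain ⟨b, ⟨hbl, hbt⟩, hbx⟩ := hx'
    have hab : a = b := pv_key_inj l hnd hal hbl (hax.trans hbx.symm)
    apply hne
    have h1 := beq_iff_eq.mp hat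
    have h2 := beq_iff_eq.mp hbt
    rw [← h1, ← h2, hab]

/-- B's label table lookup of the `i`-th key equals A's running-counter label. -/
lemma pv_lab_getD (l : List (String × String)) (hnd : (l.map (fun pt => pt.1)).Nodup)
    (i : Nat) (hi : i < l.length) :
    ((pvFlat l).foldl (fun d pl => d.insert pl.1 pl.2) PySem.Dict.empty).getD l[i].1 ""
    = l[i].2 ++ "_" ++ PySem.Int.toStr ((((l.take i).map (fun pt => pt.2)).count l[i].2 : Int) + 1) := by
  set t := l[i].2 with htdef
  set j := ((l.take i).map (fun pt => pt.2)).count t with hjdef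
  apply pv_getD_foldl_insert_of_mem _ _ _ _ (pv_flat_keys_nodup l hnd)
  -- membership of (l[i].1, t ++ "_" ++ toStr (j+1)) in pvFlat l
  unfold pvFlat
  apply List.mem_flatMap.mpr
  refine ⟨t, ?_, ?_⟩
  · rw [PySem.List.mem_dedup]
    exact List.mem_map.mpr ⟨l[i], List.getElem_mem hi, rfl⟩
  · apply List.mem_map.mpr
    refine ⟨((j : Int) + 1, l[i].1), ?_, rfl⟩
    apply (PySem.List.mem_enumerate_iff _ _ _).mpr
    -- the filtered key list splits at position i
    have hsplit : l.filter (fun pt => pt.2 == t)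
        = (l.take i).filter (fun pt => pt.2 == t) ++ l[i] :: (l.drop (i + 1)).filter (fun pt => pt.2 == t) := by
      conv_lhs => rw [← List.take_append_drop i l]
      rw [List.filter_append, List.drop_eq_getElem_cons hi, List.filter_cons]
      simp [htdef]
    have hjlen : ((l.take i).filter (fun pt => pt.2 == t)).length = j := by
      rw [hjdef, ← List.countP_eq_length_filter, List.count, List.countP_map]
      rfl
    have hlen : j < ((l.filter (fun pt => pt.2 == t)).map (fun pt => pt.1)).length := by
      rw [List.length_map, hsplit]
      simp [hjlen]
    refine ⟨j, hlen, ?_⟩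
    have hget : ((l.filter (fun pt => pt.2 == t)).map (fun pt => pt.1))[j]'hlen = l[i].1 := by
      rw [List.getElem_map]
      have : (l.filter (fun pt => pt.2 == t))[j]'(by simpa using hlen) = l[i] := by
        simp only [hsplit]
        rw [List.getElem_append_right (by omega)]
        simp [hjlen]
      rw [this]
    rw [hget]
    simp [Int.add_comm]

-- ===== VERDICT (by name: the statement is the Claim_ definition above) =====
theorem number_type_spec : Claim_equal_number_type := by
  intro l _ hnd
  unfold Spec_number_type number_type number_type_alt
  simp only [pv_loopA_eq, pv_lab_eq_foldl_flat]
  have hmap : l.map (fun pt =>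
        (pt.1, ((pvFlat l).foldl (fun d pl => d.insert pl.1 pl.2) PySem.Dict.empty).getD pt.1 ""))
      = pvBuild PySem.Dict.empty l := by
    apply List.ext_getElem
    · simp [pvBuild_length]
    · intro i hi hb
      have hil : i < l.length := by simpa using hi
      rw [List.getElem_map, pvBuild_getElem l _ i hil hb, pv_lab_getD l hnd i hil]
      simp [PySem.Dict.getD_empty]
  have h1 : l.foldl (fun d pt =>
        d.insert pt.1 (((pvFlat l).foldl (fun d pl => d.insert pl.1 pl.2) PySem.Dict.empty).getD pt.1 ""))
        PySem.Dict.empty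
      = (pvBuild PySem.Dict.empty l).foldl (fun d pl => d.insert pl.1 pl.2) PySem.Dict.empty := by
    rw [← hmap, List.foldl_map]
  have h2 : l.foldl (fun d pt =>
        d.insert (((pvFlat l).foldl (fun d pl => d.insert pl.1 pl.2) PySem.Dict.empty).getD pt.1 "") pt.1)
        PySem.Dict.empty
      = (pvBuild PySem.Dict.empty l).foldl (fun d pl => d.insert pl.2 pl.1) PySem.Dict.empty := by
    rw [← hmap, List.foldl_map]
  rw [h1, h2]
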